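-- pv_equiv track=rewrite | github.com/hothanhtuan1209/python-training | practice-2/markov_analysis.py | markov_analysis
-- ===== SOURCE A (Python) =====
-- def markov_analysis(text, prefix_length):
--     """
--     Performs Markov analysis on the given text.
--
--     text: string
--     prefix_length: int
--
--     returns: dict
--     """
--
--     prefixes = {}
--     words = text.split()
--
--     for i in range(len(words) - prefix_length):
--         prefix = tuple(words[i:i+prefix_length])
--         suffix = words[i+prefix_length]
--
--         if prefix in prefixes:
--             prefixes[prefix].append(suffix)
--         else:
--             prefixes[prefix] = [suffix]
--
--     return prefixes
-- ===== SOURCE B (Python) =====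
-- def markov_analysis(text, prefix_length):
--     """
--     Two-stage grouping instead of single-pass hash aggregation:
--     materialise the flat list of (prefix, suffix) windows once, then for
--     the first occurrence of each distinct prefix collect its whole suffix
--     list by one filtering pass over that window list.
--     """
--     words = text.split()
--     windows = [(tuple(words[i:i + prefix_length]), words[i + prefix_length])
--                for i in range(len(words) - prefix_length)]
--     result = {}
--     for prefix, _ in windows:
--         if prefix not in result:
--             result[prefix] = [s for p, s in windows if p == prefix]
--     return result
-- ===== Notes on version B (the rewrite author's own statement) =====
-- stated objective: alternative
-- what changed: Replaces A's single-pass hash aggregation (appending each suffix to the growing list of its prefix) with a staged grouping: materialise the flat (prefix, suffix) window list once, then for the first occurrence of each distinct prefix build its complete suffix list in one filtering pass over the windows.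
import Mathlib
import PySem

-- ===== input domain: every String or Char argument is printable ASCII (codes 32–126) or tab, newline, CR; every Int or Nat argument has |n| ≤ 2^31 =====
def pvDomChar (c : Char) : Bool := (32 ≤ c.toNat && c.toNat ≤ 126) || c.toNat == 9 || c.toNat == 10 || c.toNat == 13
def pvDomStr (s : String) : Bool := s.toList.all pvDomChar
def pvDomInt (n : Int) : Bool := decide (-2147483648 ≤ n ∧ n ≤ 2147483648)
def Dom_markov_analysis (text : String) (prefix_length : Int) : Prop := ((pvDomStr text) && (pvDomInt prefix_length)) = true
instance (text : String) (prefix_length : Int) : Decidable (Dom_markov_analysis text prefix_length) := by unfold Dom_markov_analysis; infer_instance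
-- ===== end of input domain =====

-- B replaces A's single-pass hash aggregation by a staged grouping: the flat
-- (prefix, suffix) window list is built once, then the suffix list of each
-- distinct prefix is collected by one filtering pass (objective: alternative).


-- ===== PORT A =====
-- A: dict built by an index loop; prefix re-sliced at every i, suffix looked
-- up at i+prefix_length, appended per window (in-test branch).
def markov_analysis (text : String) (prefix_length : Int) : List (List String × List String) :=
  let words := PySem.Str.split₀ text
  let prefixes :=
    (PySem.List.pyRange 0 ((words.length : Int) - prefix_length) 1).foldl
      (fun (d : PySem.Dict (List String) (List String)) i =>
        let pfx := PySem.List.slice words (some i) (some (i + prefix_length))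
        let sfx := PySem.List.pyGetD words (i + prefix_length) ""
        if d.contains pfx then d.modify pfx [] (· ++ [sfx])
        else d.insert pfx [sfx])
      PySem.Dict.empty
  prefixes.items

-- ===== PORT B =====
-- B: the window list is materialised first; the loop inserts, at the first
-- occurrence of each prefix, the whole suffix list filtered from the windows.
def markov_analysis_alt (text : String) (prefix_length : Int) : List (List String × List String) :=
  let words := PySem.Str.split₀ text
  let windows :=
    (PySem.List.pyRange 0 ((words.length : Int) - prefix_length) 1).map
      (fun i => (PySem.List.slice words (some i) (some (i + prefix_length)),
                 PySem.List.pyGetD words (i + prefix_length) ""))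
  let result :=
    windows.foldl
      (fun (d : PySem.Dict (List String) (List String)) pw =>
        if d.contains pw.1 then d
        else d.insert pw.1 ((windows.filter (fun q => q.1 == pw.1)).map (·.2)))
      PySem.Dict.empty
  result.items

-- ===== PRECONDITION & SPEC =====
-- Pre_ excludes exactly the inputs on which A raises IndexError: prefix_length
-- below -len(words) makes the suffix index words[i+prefix_length] out of range
-- (B's identical indexing raises there too).
def Pre_markov_analysis (text : String) (prefix_length : Int) : Prop :=
  -((PySem.Str.split₀ text).length : Int) ≤ prefix_length
instance (text : String) (prefix_length : Int) : Decidable (Pre_markov_analysis text prefix_length) := by unfold Pre_markov_analysis; infer_instance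
def pvWitness_markov_analysis : String × Int := ("the quick brown fox the quick", 2)

def Spec_markov_analysis (text : String) (prefix_length : Int) (out : List (List String × List String)) : Prop := out = markov_analysis_alt text prefix_length
instance (text : String) (prefix_length : Int) (out : List (List String × List String)) : Decidable (Spec_markov_analysis text prefix_length out) := by unfold Spec_markov_analysis; infer_instance

-- ===== CLAIM (what is proved, stated in full; the proofs are below) =====
def Claim_equal_markov_analysis : Prop := ∀ (text : String) (prefix_length : Int), Dom_markov_analysis text prefix_length → Pre_markov_analysis text prefix_length → Spec_markov_analysis text prefix_length (markov_analysis text prefix_length)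

-- ===== LEMMAS AND PROOFS =====

-- A's in-test/append branch is the unconditional "modify with default []".
theorem pv_step_eq (d : PySem.Dict (List String) (List String)) (k : List String) (v : String) :
    (if d.contains k then d.modify k [] (· ++ [v]) else d.insert k [v]) = d.modify k [] (· ++ [v]) := by
  by_cases h : d.contains k
  · simp [h]
  · simp only [Bool.not_eq_true] at h
    rw [if_neg (by simp [h]), PySem.Dict.modify, PySem.Dict.getD_of_not_contains d [] h]
    simp

-- B's first-occurrence-insert loop: its keys are the first occurrences of the
-- window prefixes, and each key holds exactly the list g computed for it.
theorem pv_B_invariant (g : List String → List String) :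
    ∀ (l : List (List String × String)) (d : PySem.Dict (List String) (List String)),
      (l.foldl (fun d p => if d.contains p.1 then d else d.insert p.1 (g p.1)) d).keys
        = PySem.Set.update d.keys (l.map (·.1))
      ∧ ∀ c, (l.foldl (fun d p => if d.contains p.1 then d else d.insert p.1 (g p.1)) d).getD c []
          = if d.contains c then d.getD c []
            else if c ∈ l.map (·.1) then g c else [] := by
  intro l
  induction l with
  | nil =>
    intro d
    refine ⟨by simp [PySem.Set.update_nil], fun c => ?_⟩
    by_cases hc : d.contains c
    · simp [hc]
    · simp only [Bool.not_eq_true] at hc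
      simp [hc, PySem.Dict.getD_of_not_contains d [] hc]
  | cons p l ih =>
    intro d
    simp only [List.foldl_cons, List.map_cons, PySem.Set.update_cons]
    by_cases h : d.contains p.1
    · rw [if_pos h]
      refine ⟨?_, ?_⟩
      · rw [(ih d).1]
        congr 1
        rw [PySem.Set.add_of_mem ((PySem.Dict.contains_iff_mem_keys d p.1).mp h)]
      · intro c
        rw [(ih d).2 c]
        by_cases hc : d.contains c
        · simp [hc]
        · have hne : c ≠ p.1 := by rintro rfl; exact hc h
          simp only [Bool.not_eq_true] at hc
          simp only [hc, Bool.false_eq_true, if_false]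
          exact (if_congr (by simp [hne]) rfl rfl).symm
    · rw [if_neg h]
      simp only [Bool.not_eq_true] at h
      have hmem : p.1 ∉ d.keys := fun hm =>
        by simpa [h] using (PySem.Dict.contains_iff_mem_keys d p.1).mpr hm
      refine ⟨?_, ?_⟩
      · rw [(ih _).1, PySem.Dict.keys_insert_of_not_contains d (g p.1) h,
          PySem.Set.add_of_not_mem hmem]
      · intro c
        rw [(ih _).2 c]
        by_cases hc : c = p.1
        · subst hc
          simp [PySem.Dict.contains_insert_self, PySem.Dict.getD_insert_self, h]
        · rw [PySem.Dict.contains_insert, PySem.Dict.getD_insert_of_ne d (g p.1) [] hc]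
          have hbe : (c == p.1) = false := by simpa using hc
          simp only [hbe, Bool.false_or]
          by_cases hdc : d.contains c
          · simp [hdc]
          · simp only [Bool.not_eq_true] at hdc
            simp only [hdc, Bool.false_eq_true, if_false]
            exact (if_congr (by simp [hc]) rfl rfl).symm

-- The core grouping fact: over any window list W, A's append-aggregation loop
-- and B's first-occurrence filter-insert loop build dicts with equal items.
theorem pv_group_eq (W : List (List String × String)) :
    (W.foldl (fun (d : PySem.Dict (List String) (List String)) p =>
        d.modify p.1 [] (· ++ [p.2])) PySem.Dict.empty).items
    = (W.foldl (fun (d : PySem.Dict (List String) (List String)) p =>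
        if d.contains p.1 then d
        else d.insert p.1 ((W.filter (fun q => q.1 == p.1)).map (·.2))) PySem.Dict.empty).items := by
  have hg : (fun (d : PySem.Dict (List String) (List String)) (p : List String × String) =>
      if d.contains p.1 then d
      else d.insert p.1 ((W.filter (fun q => q.1 == p.1)).map (·.2)))
      = (fun d p => if d.contains p.1 then d
          else d.insert p.1 ((fun c => (W.filter (fun q => q.1 == c)).map (·.2)) p.1)) := rfl
  rw [hg]
  have hB := pv_B_invariant (fun c => (W.filter (fun q => q.1 == c)).map (·.2)) W
    PySem.Dict.empty
  have hkA := PySem.Dict.keys_foldl_modify_key W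
    (fun p : List String × String => p.1) ([] : List String)
    (fun _ p => (· ++ [p.2])) PySem.Dict.empty
  have hndA := PySem.Dict.nodup_keys_foldl_modify_key W
    (fun p : List String × String => p.1) ([] : List String)
    (fun _ p => (· ++ [p.2])) PySem.Dict.empty (by simp [PySem.Dict.keys_empty])
  have hkeys : PySem.Set.update (PySem.Dict.empty : PySem.Dict (List String) (List String)).keys
      (W.map (·.1)) = PySem.Set.ofList (W.map (·.1)) := by
    simp [PySem.Dict.keys_empty, PySem.Set.update_nil_left]
  have hndB : (W.foldl (fun (d : PySem.Dict (List String) (List String)) p =>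
      if d.contains p.1 then d
      else d.insert p.1 ((fun c => (W.filter (fun q => q.1 == c)).map (·.2)) p.1))
      PySem.Dict.empty).keys.Nodup := by
    rw [hB.1, hkeys]; exact PySem.Set.nodup_ofList _
  rw [PySem.Dict.items_eq_map_keys _ hndA [], PySem.Dict.items_eq_map_keys _ hndB []]
  rw [hkA, hB.1, hkeys]
  apply List.map_congr_left
  intro k hk
  have hkmem : k ∈ W.map (·.1) := (PySem.Set.mem_ofList _ _).mp hk
  have hA := PySem.Dict.getD_foldl_modify_append W
    (PySem.Dict.empty : PySem.Dict (List String) (List String)) k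
  rw [hB.2 k]
  simp only [PySem.Dict.contains_empty, PySem.Dict.getD_empty] at hA ⊢
  rw [hA]
  simp [hkmem]

-- ===== VERDICT (by name: the statement is the Claim_ definition above) =====
theorem markov_analysis_spec : Claim_equal_markov_analysis := by
  intro text p _ _
  unfold Spec_markov_analysis markov_analysis markov_analysis_alt
  set ws := PySem.Str.split₀ text with hws
  simp only []
  rw [List.foldl_map]
  have hbody : ∀ (d : PySem.Dict (List String) (List String)) (i : Int),
      (let pfx := PySem.List.slice ws (some i) (some (i + p))
       let sfx := PySem.List.pyGetD ws (i + p) ""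
       if d.contains pfx then d.modify pfx [] (· ++ [sfx])
       else d.insert pfx [sfx])
      = d.modify (PySem.List.slice ws (some i) (some (i + p))) []
          (· ++ [PySem.List.pyGetD ws (i + p) ""]) := by
    intro d i
    exact pv_step_eq d _ _
  simp only [hbody]
  rw [← List.foldl_map
    (f := fun i : Int => (PySem.List.slice ws (some i) (some (i + p)), PySem.List.pyGetD ws (i + p) ""))
    (g := fun (d : PySem.Dict (List String) (List String)) (q : List String × String) =>
      d.modify q.1 [] (fun x => x ++ [q.2]))]
  rw [pv_group_eq ((PySem.List.pyRange 0 ((ws.length : Int) - p) 1).map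
    (fun i => (PySem.List.slice ws (some i) (some (i + p)), PySem.List.pyGetD ws (i + p) "")))]
  rw [List.foldl_map]
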